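-- pv_equiv track=rewrite | github.com/BeAllAround/FreeStyle | Codewars/Matrix Expansion.py | expansion
-- ===== SOURCE A (Python) =====
-- def zero_base(arr):
--     for item in arr:
--         if item != 0:
--             return False;
--     return True;
--
-- def expansion(matrix, n):
--     _matrix = [];
--     for m in matrix:
--         _m = list(m);
--         for j in range(n):
--             _m.append(0);
--         _matrix.append(_m);
--     for _ in range(n):
--         _matrix.append([0 for _ in range(len(_matrix[0]))])
--     for x in range(len(_matrix)):
--         if not zero_base(_matrix[x]):
--             _i = n;
--             for _ in range(n):
--                 _matrix[x][-_i] = (sum(_matrix[x][:-_i]));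
--                 _i -= 1;
--         else:
--             c = 0;
--             _s = 0;
--             _arr = [];
--             while c < len(_matrix[x]):
--                 for j in range(0, x):
--                     _s += _matrix[j][c]
--                 c += 1;
--                 _arr.append(_s);
--                 _s = 0;
--             c = 0; # reset
--             _s = 0;
--             for j in range(0, x):
--                 _s += _matrix[j][c]
--                 c += 1;
--             _arr[c] = _s;
--             c += 1;
--             while c < len(_matrix[x]):
--                 _arr[c] = sum(_arr[:c]);
--                 c += 1;
--             _matrix[x] = list(_arr);
--     return _matrix;
-- ===== SOURCE B (Python) =====
-- def expansion(matrix, n):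
--     k = n if n > 0 else 0
--     R = len(matrix)
--     C = len(matrix[0]) if matrix else 0
--     W = C + k
--     out = []
--     colsums = [0] * W
--     diag = 0
--     for x in range(R + k):
--         if x < R and any(v != 0 for v in matrix[x]):
--             row = list(matrix[x])
--             t = sum(row)
--             for _ in range(k):
--                 row.append(t)
--                 t += t
--         else:
--             row = colsums[:x] + [diag]
--             t = sum(row)
--             while len(row) < W:
--                 row.append(t)
--                 t += t
--         out.append(row)
--         colsums = [s + v for s, v in zip(colsums, row)]
--         diag += row[x] if x < W else 0
--     return out
-- ===== Notes on version B (the rewrite author's own statement) =====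
-- stated objective: faster
-- what changed: B builds the expanded matrix in one pass keeping running column sums, a running diagonal sum and a doubling running total, instead of A's re-summing of every column over all previous rows and of every prefix for each new cell.
-- outside the precondition, e.g. on expansion([[1, 2], [3]], 0): A returns [[1, 2], [3]], B raises IndexError
import Mathlib
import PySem

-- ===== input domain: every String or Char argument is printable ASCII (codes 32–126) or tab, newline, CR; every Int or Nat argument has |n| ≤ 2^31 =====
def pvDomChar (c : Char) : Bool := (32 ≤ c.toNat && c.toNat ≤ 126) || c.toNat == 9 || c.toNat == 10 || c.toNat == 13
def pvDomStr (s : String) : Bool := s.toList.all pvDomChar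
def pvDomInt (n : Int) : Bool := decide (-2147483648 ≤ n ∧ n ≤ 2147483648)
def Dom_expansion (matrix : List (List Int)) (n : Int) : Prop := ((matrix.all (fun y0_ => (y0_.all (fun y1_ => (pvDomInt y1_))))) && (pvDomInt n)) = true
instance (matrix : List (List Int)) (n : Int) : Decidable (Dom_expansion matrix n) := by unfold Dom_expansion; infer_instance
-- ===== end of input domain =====

-- B replaces A's repeated column/prefix re-summations by running column sums, a running
-- diagonal sum and a doubling running total (objective: faster, asymptotically fewer additions).

-- ===== PORT A =====
def zeroBase (arr : List Int) : Bool :=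
  arr.all (fun item => item == 0)

-- the non-zero-row branch: for _ in range(n): _matrix[x][-_i] = sum(_matrix[x][:-_i]); _i -= 1
def expAFill (x : Int) (n : Int) (mat : List (List Int)) : List (List Int) :=
  ((PySem.List.pyRange 0 n 1).foldl (fun (p : List (List Int) × Int) _ =>
      let row := PySem.List.pyGetD p.1 x []
      let row' := PySem.List.pySetD row (-p.2) (PySem.List.slice row none (some (-p.2))).sum
      (PySem.List.pySetD p.1 x row', p.2 - 1)) (mat, n)).1

-- the all-zero-row branch body (computes the replacement row _arr)
def expAZero (x : Int) (mat : List (List Int)) : List Int :=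
  let rowx := PySem.List.pyGetD mat x []
  let L : Int := (rowx.length : Int)
  let arr0 := (PySem.List.pyRange 0 L 1).foldl (fun arr c =>
      arr ++ [(PySem.List.pyRange 0 x 1).foldl
        (fun s j => s + PySem.List.pyGetD (PySem.List.pyGetD mat j []) c 0) 0]) []
  let sc := (PySem.List.pyRange 0 x 1).foldl (fun (p : Int × Int) j =>
      (p.1 + PySem.List.pyGetD (PySem.List.pyGetD mat j []) p.2 0, p.2 + 1)) ((0 : Int), (0 : Int))
  let arr1 := PySem.List.pySetD arr0 sc.2 sc.1
  (PySem.List.pyRange (sc.2 + 1) L 1).foldl (fun arr c =>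
      PySem.List.pySetD arr c (PySem.List.slice arr none (some c)).sum) arr1

def expansion (matrix : List (List Int)) (n : Int) : List (List Int) :=
  let m1 := matrix.foldl (fun acc m =>
      acc ++ [(PySem.List.pyRange 0 n 1).foldl (fun r _ => r ++ [(0 : Int)]) m]) []
  let m2 := (PySem.List.pyRange 0 n 1).foldl (fun acc _ =>
      acc ++ [(PySem.List.pyRange 0 ((PySem.List.pyGetD acc 0 []).length : Int) 1).map
        (fun _ => (0 : Int))]) m1
  (PySem.List.pyRange 0 (m2.length : Int) 1).foldl (fun mat x =>
      if ¬ zeroBase (PySem.List.pyGetD mat x []) = true then expAFill x n mat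
      else PySem.List.pySetD mat x (expAZero x mat)) m2

-- ===== PORT B =====
-- while len(row) < W: row.append(t); t += t
def growB (W : Nat) (row : List Int) (t : Int) : List Int :=
  if row.length < W then growB W (row ++ [t]) (t + t) else row
termination_by W - row.length
decreasing_by simp_all; omega

def expansion_alt (matrix : List (List Int)) (n : Int) : List (List Int) :=
  let k : Nat := if 0 < n then n.toNat else 0
  let R := matrix.length
  let C := match matrix with | [] => 0 | r :: _ => r.length
  let W := C + k
  ((List.range (R + k)).foldl (fun (st : List (List Int) × List Int × Int) x =>
      let row :=
        if x < R ∧ ((matrix.getD x []).any (fun v => !(v == 0))) = true then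
          let r := matrix.getD x []
          ((List.range k).foldl (fun (p : List Int × Int) _ => (p.1 ++ [p.2], p.2 + p.2))
            (r, r.sum)).1
        else
          let row0 := st.2.1.take x ++ [st.2.2]
          growB W row0 row0.sum
      (st.1 ++ [row],
       ((st.2.1.zip row).map (fun p => p.1 + p.2),
        st.2.2 + (if x < W then row.getD x 0 else 0))))
    ([], (List.replicate W (0 : Int), (0 : Int)))).1

-- ===== PRECONDITION & SPEC =====
-- Pre_ excludes exactly the inputs where the Python A raises IndexError: an empty matrix with
-- n ≥ 1, a row count exceeding the column count with n ≥ 1, an all-zero row at an index ≥ the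
-- expanded width, and (cited) ragged matrices, on a few of which A happens to return.
def Pre_expansion (matrix : List (List Int)) (n : Int) : Prop :=
  (∀ r ∈ matrix, r.length = (matrix.headD []).length) ∧
  (1 ≤ n → matrix ≠ [] ∧ matrix.length ≤ (matrix.headD []).length) ∧
  ∀ i < matrix.length, (∀ v ∈ matrix.getD i [], v = 0) →
    i < (matrix.headD []).length + n.toNat
instance (matrix : List (List Int)) (n : Int) : Decidable (Pre_expansion matrix n) := by
  unfold Pre_expansion; infer_instance
def pvWitness_expansion : List (List Int) × Int := ([[1, 2], [3, 4]], 2)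
def Spec_expansion (matrix : List (List Int)) (n : Int) (out : List (List Int)) : Prop :=
  out = expansion_alt matrix n
instance (matrix : List (List Int)) (n : Int) (out : List (List Int)) :
    Decidable (Spec_expansion matrix n out) := by unfold Spec_expansion; infer_instance

-- ===== CLAIM (what is proved, stated in full; the proofs are below) =====
def Claim_equal_expansion : Prop := ∀ (matrix : List (List Int)) (n : Int),
  Dom_expansion matrix n → Pre_expansion matrix n → Spec_expansion matrix n (expansion matrix n)

-- ===== LEMMAS AND PROOFS =====

-- proof-side abbreviations
def pvK (n : Int) : Nat := if 0 < n then n.toNat else 0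
def pvC (matrix : List (List Int)) : Nat := match matrix with | [] => 0 | r :: _ => r.length
def pvW (matrix : List (List Int)) (n : Int) : Nat := pvC matrix + pvK n
def pvH (matrix : List (List Int)) (n : Int) : Nat := matrix.length + pvK n
def pvM2 (matrix : List (List Int)) (n : Int) : List (List Int) :=
  matrix.map (fun r => r ++ List.replicate (pvK n) 0) ++
    List.replicate (pvK n) (List.replicate (pvW matrix n) 0)
def pvAStep (n : Int) (mat : List (List Int)) (xN : Nat) : List (List Int) :=
  if ¬ zeroBase (PySem.List.pyGetD mat (xN : Int) []) = true then expAFill (xN : Int) n mat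
  else PySem.List.pySetD mat (xN : Int) (expAZero (xN : Int) mat)
def pvBrow (matrix : List (List Int)) (n : Int)
    (st : List (List Int) × List Int × Int) (x : Nat) : List Int :=
  if x < matrix.length ∧ ((matrix.getD x []).any (fun v => !(v == 0))) = true then
    let r := matrix.getD x []
    ((List.range (pvK n)).foldl (fun (p : List Int × Int) _ => (p.1 ++ [p.2], p.2 + p.2))
      (r, r.sum)).1
  else
    let row0 := st.2.1.take x ++ [st.2.2]
    growB (pvW matrix n) row0 row0.sum
def pvBStep (matrix : List (List Int)) (n : Int)
    (st : List (List Int) × List Int × Int) (x : Nat) : List (List Int) × List Int × Int :=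
  (st.1 ++ [pvBrow matrix n st x],
   ((st.2.1.zip (pvBrow matrix n st x)).map (fun p => p.1 + p.2),
    st.2.2 + (if x < pvW matrix n then (pvBrow matrix n st x).getD x 0 else 0)))
def pvBState (matrix : List (List Int)) (n : Int) (x : Nat) :
    List (List Int) × List Int × Int :=
  (List.range x).foldl (pvBStep matrix n) ([], (List.replicate (pvW matrix n) 0, 0))
def pvCols (W : Nat) (out : List (List Int)) : List Int :=
  (List.range W).map (fun c => (out.map (fun r => r.getD c 0)).sum)
def pvDiag (out : List (List Int)) (m : Nat) : Int :=
  ((List.range m).map (fun j => (out.getD j []).getD j 0)).sum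
def pvInv (matrix : List (List Int)) (n : Int) (x : Nat) : Prop :=
  (List.range x).foldl (pvAStep n) (pvM2 matrix n)
      = (pvBState matrix n x).1 ++ (pvM2 matrix n).drop x
    ∧ (pvBState matrix n x).1.length = x
    ∧ (∀ r ∈ (pvBState matrix n x).1, r.length = pvW matrix n)
    ∧ (pvBState matrix n x).2.1 = pvCols (pvW matrix n) (pvBState matrix n x).1
    ∧ (pvBState matrix n x).2.2 = pvDiag (pvBState matrix n x).1 (min x (pvW matrix n))

theorem pvK_eq (n : Int) : pvK n = n.toNat := by unfold pvK; split <;> omega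

-- the doubling list [t, 2t, 4t, ...]
def dbl (t : Int) : Nat → List Int
  | 0 => []
  | m + 1 => t :: dbl (t + t) m

-- "set position p to the sum of the prefix before it", m times, moving right
def fillIter : Nat → List Int → Nat → List Int
  | 0, arr, _ => arr
  | m + 1, arr, p => fillIter m (arr.set p (arr.take p).sum) (p + 1)

theorem fillIter_succ (m : Nat) (arr : List Int) (p : Nat) :
    fillIter (m + 1) arr p = fillIter m (arr.set p (arr.take p).sum) (p + 1) := rfl

theorem dbl_length (t : Int) (m : Nat) : (dbl t m).length = m := by
  induction m generalizing t with
  | zero => rfl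
  | succ m ih => simp [dbl, ih]

theorem fillIter_eq (m : Nat) : ∀ (arr : List Int) (p : Nat), p + m ≤ arr.length →
    fillIter m arr p = arr.take p ++ dbl (arr.take p).sum m ++ arr.drop (p + m) := by
  induction m with
  | zero =>
    intro arr p h
    simp only [fillIter, dbl, List.append_nil, Nat.add_zero]
    rw [List.take_append_drop]
  | succ m ih =>
    intro arr p h
    have hpL : p < arr.length := by omega
    have harr1eq : arr.set p (arr.take p).sum
        = arr.take p ++ (arr.take p).sum :: arr.drop (p + 1) := by
      rw [List.set_eq_take_append_cons_drop, if_pos hpL]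
    rw [fillIter, ih _ (p + 1) (by simp; omega)]
    have hlt : (arr.take p).length = p := by simp; omega
    have htake : (arr.set p (arr.take p).sum).take (p + 1) = arr.take p ++ [(arr.take p).sum] := by
      rw [harr1eq, List.take_append]
      congr 1
      · rw [List.take_of_length_le (by omega)]
      · rw [hlt, show p + 1 - p = 1 by omega]
        simp
    have hdrop : (arr.set p (arr.take p).sum).drop (p + 1 + m) = arr.drop (p + (m + 1)) := by
      rw [harr1eq, List.drop_append, List.drop_of_length_le (by rw [hlt]; omega), hlt,
        show p + 1 + m - p = m + 1 by omega]
      simp only [List.nil_append, List.drop_succ_cons, List.drop_drop]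
      congr 1
      omega
    rw [htake, hdrop]
    have hsum : (arr.take p ++ [(arr.take p).sum]).sum = (arr.take p).sum + (arr.take p).sum := by
      simp
    rw [hsum]
    simp only [dbl, List.append_assoc, List.cons_append, List.nil_append]

theorem growB_eq (W : Nat) (m : Nat) : ∀ (row : List Int) (t : Int),
    row.length + m = W → growB W row t = row ++ dbl t m := by
  induction m with
  | zero =>
    intro row t h
    rw [growB, if_neg (by omega)]
    simp [dbl]
  | succ m ih =>
    intro row t h
    rw [growB, if_pos (by omega)]
    rw [ih (row ++ [t]) (t + t) (by simp; omega)]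
    simp [dbl]

theorem range_foldl_dbl (k : Nat) : ∀ (row : List Int) (t : Int),
    ((List.range k).foldl (fun (p : List Int × Int) _ => (p.1 ++ [p.2], p.2 + p.2))
      (row, t)).1 = row ++ dbl t k := by
  induction k with
  | zero => intro row t; simp [dbl]
  | succ k ih =>
    intro row t
    rw [List.range_succ_eq_map]
    simp only [List.foldl_cons, List.foldl_map]
    rw [ih (row ++ [t]) (t + t)]
    simp [dbl]

theorem pySetD_neg (xs : List Int) (i : Int) (v : Int) (h1 : 0 < i) (h2 : i ≤ (xs.length : Int)) :
    PySem.List.pySetD xs (-i) v = xs.set (xs.length - i.toNat) v := by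
  unfold PySem.List.pySetD PySem.List.pySet? PySem.List.pyIdx?
  rw [if_neg (by omega), if_pos (by omega)]
  simp only [Option.map_some, Option.getD_some]
  congr 1
  omega

theorem slice_to_neg (xs : List Int) (i : Int) (h1 : 0 < i) :
    PySem.List.slice xs none (some (-i)) = xs.take (xs.length - i.toNat) := by
  rw [show (-i) = -((i.toNat : Nat) : Int) by omega]
  exact PySem.List.slice_to_neg_natCast xs i.toNat (by omega)

theorem getD_append_cons {α : Type} (l1 l2 : List α) (a d : α) :
    (l1 ++ a :: l2).getD l1.length d = a := by
  rw [List.getD_eq_getElem _ _ (by rw [List.length_append, List.length_cons]; omega)]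
  rw [List.getElem_append_right (by omega)]
  simp

theorem set_append_cons {α : Type} (l1 l2 : List α) (a b : α) :
    (l1 ++ a :: l2).set l1.length b = l1 ++ b :: l2 := by
  induction l1 with
  | nil => simp
  | cons h t ih => simp [ih]

theorem getD_range_map {α β : Type} (d : α) (f : α → β) (l : List α) :
    (List.range l.length).map (fun j => f (l.getD j d)) = l.map f := by
  apply List.ext_getElem
  · simp
  · intro i h1 h2
    simp only [List.getElem_map, List.getElem_range]
    rw [List.getD_eq_getElem _ _ (by simpa using h2)]

theorem zip_map_range (W : Nat) (f : Nat → Int) (row : List Int) (h : row.length = W) :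
    ((List.range W).map f).zip row = (List.range W).map (fun c => (f c, row.getD c 0)) := by
  apply List.ext_getElem
  · simp [h]
  · intro i h1 h2
    have hi : i < W := by simpa using h2
    rw [List.getElem_zip]
    simp only [List.getElem_map, List.getElem_range]
    rw [List.getD_eq_getElem _ _ (by omega)]

-- A's per-row loop for a non-zero row is fillIter on that row
theorem fillA_aux (m : Nat) : ∀ (mat : List (List Int)) (xN : Nat) (i : Int),
    xN < mat.length → (m : Int) ≤ i → i ≤ ((mat.getD xN []).length : Int) →
    ((List.range m).foldl (fun (p : List (List Int) × Int) _ =>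
        (PySem.List.pySetD p.1 (xN : Int)
           (PySem.List.pySetD (PySem.List.pyGetD p.1 (xN : Int) []) (-p.2)
             (PySem.List.slice (PySem.List.pyGetD p.1 (xN : Int) []) none (some (-p.2))).sum),
         p.2 - 1)) (mat, i)).1
    = mat.set xN (fillIter m (mat.getD xN []) ((mat.getD xN []).length - i.toNat)) := by
  induction m with
  | zero =>
    intro mat xN i hx hm hi
    simp only [List.range_zero, List.foldl_nil, fillIter]
    rw [List.getD_eq_getElem _ _ hx, List.set_getElem_self]
  | succ m ih =>
    intro mat xN i hx hm hi
    rw [List.range_succ_eq_map]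
    simp only [List.foldl_cons, List.foldl_map]
    have hi1 : (1 : Int) ≤ i := by push_cast at hm; omega
    have hpy : PySem.List.pyGetD mat (xN : Int) [] = mat.getD xN [] := by simp
    rw [hpy, pySetD_neg _ i _ (by omega) (by push_cast at hi ⊢; omega),
      slice_to_neg _ i (by omega), PySem.List.pySetD_natCast]
    rw [ih (mat.set xN ((mat.getD xN []).set ((mat.getD xN []).length - i.toNat)
          ((List.take ((mat.getD xN []).length - i.toNat) (mat.getD xN [])).sum))) xN (i - 1)
      (by simp; omega) (by push_cast at hm ⊢; omega)
      (by rw [List.getD_eq_getElem _ _ (by simpa using hx), List.getElem_set_self]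
          simp only [List.length_set]
          omega)]
    have hget1 : (mat.set xN ((mat.getD xN []).set ((mat.getD xN []).length - i.toNat)
          (List.take ((mat.getD xN []).length - i.toNat) (mat.getD xN [])).sum)).getD xN []
        = (mat.getD xN []).set ((mat.getD xN []).length - i.toNat)
          (List.take ((mat.getD xN []).length - i.toNat) (mat.getD xN [])).sum := by
      rw [List.getD_eq_getElem _ _ (by simpa using hx), List.getElem_set_self]
    rw [hget1, List.set_set]
    congr 1
    rw [show ((mat.getD xN []).set ((mat.getD xN []).length - i.toNat)
          (List.take ((mat.getD xN []).length - i.toNat) (mat.getD xN [])).sum).length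
          - (i - 1).toNat = ((mat.getD xN []).length - i.toNat) + 1 by
      rw [List.length_set]; omega]
    rw [fillIter_succ]

-- A's trailing loop in the zero-row branch is fillIter as well
theorem fillC_aux (m : Nat) : ∀ (arr : List Int) (p : Nat),
    ((List.range m).foldl (fun (arr : List Int) (j : Nat) =>
        PySem.List.pySetD arr (((p + j : Nat) : Int))
          (PySem.List.slice arr none (some ((p + j : Nat) : Int))).sum) arr)
      = fillIter m arr p := by
  induction m with
  | zero => intro arr p; simp [fillIter]
  | succ m ih =>
    intro arr p
    rw [List.range_succ_eq_map]
    simp only [List.foldl_cons, List.foldl_map]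
    have hfn : (fun (arr : List Int) (j : Nat) =>
        PySem.List.pySetD arr (((p + Nat.succ j : Nat) : Int))
          (PySem.List.slice arr none (some ((p + Nat.succ j : Nat) : Int))).sum)
        = (fun (arr : List Int) (j : Nat) =>
        PySem.List.pySetD arr ((((p + 1) + j : Nat) : Int))
          (PySem.List.slice arr none (some (((p + 1) + j : Nat) : Int))).sum) := by
      funext arr j
      have e : p + Nat.succ j = (p + 1) + j := by omega
      rw [e]
    simp only [Nat.add_zero]
    rw [hfn, PySem.List.pySetD_natCast, PySem.List.slice_to_natCast]
    rw [ih (arr.set p (arr.take p).sum) (p + 1)]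
    rfl

-- the diagonal-summing loop of A's zero-row branch (the counter tracks the loop variable)
theorem diag_fold (mat : List (List Int)) : ∀ (x : Nat),
    ((PySem.List.pyRange 0 (x : Int) 1).foldl (fun (p : Int × Int) j =>
        (p.1 + PySem.List.pyGetD (PySem.List.pyGetD mat j []) p.2 0, p.2 + 1))
      ((0 : Int), (0 : Int)))
    = (((List.range x).map (fun (j : Nat) =>
          PySem.List.pyGetD (PySem.List.pyGetD mat ((j : Nat) : Int) []) ((j : Nat) : Int) 0)).sum,
       (x : Int)) := by
  intro x
  induction x with
  | zero => simp [PySem.List.pyRange_one_eq_nil]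
  | succ x ih =>
    rw [show ((x + 1 : Nat) : Int) = (x : Int) + 1 by push_cast; ring]
    rw [PySem.List.pyRange_one_succ_right (by positivity), List.foldl_append]
    rw [ih]
    simp [List.range_succ]

theorem map_zero_pyRange (n : Int) :
    (PySem.List.pyRange 0 n 1).map (fun _ => (0 : Int)) = List.replicate n.toNat 0 := by
  rw [List.eq_replicate_iff]
  constructor
  · rw [List.length_map, PySem.List.length_pyRange_one]; congr 1; omega
  · intro b hb
    simp only [List.mem_map] at hb
    obtain ⟨_, _, rfl⟩ := hb
    rfl

theorem padrows_fold : ∀ (mcount : Nat) (acc : List (List Int)) (w : Nat),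
    (PySem.List.pyGetD acc 0 []).length = w → acc ≠ [] →
    (List.range mcount).foldl (fun acc _ =>
        acc ++ [List.replicate (PySem.List.pyGetD acc 0 []).length (0 : Int)]) acc
      = acc ++ List.replicate mcount (List.replicate w 0) := by
  intro mcount
  induction mcount with
  | zero => intro acc w _ _; simp
  | succ mc ih =>
    intro acc w hw hne
    rw [List.range_succ_eq_map]
    simp only [List.foldl_cons, List.foldl_map]
    rw [hw]
    obtain ⟨a, t, rfl⟩ : ∃ a t, acc = a :: t := by
      cases acc with
      | nil => exact absurd rfl hne
      | cons a t => exact ⟨a, t, rfl⟩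
    rw [show (a :: t) ++ [List.replicate w 0] = a :: (t ++ [List.replicate w 0]) from rfl]
    rw [ih (a :: (t ++ [List.replicate w 0])) w
      (by simpa [PySem.List.pyGetD_zero_cons] using hw) (by simp)]
    simp [List.replicate_succ, List.append_assoc]

-- the setup part of A: the widened-and-padded matrix, and A as a fold over row indices
theorem expansion_eq_fold (matrix : List (List Int)) (n : Int) (hne : matrix ≠ []) :
    expansion matrix n
      = (List.range (pvH matrix n)).foldl (pvAStep n) (pvM2 matrix n) := by
  obtain ⟨a, t, rfl⟩ : ∃ a t, matrix = a :: t := by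
    cases matrix with
    | nil => exact absurd rfl hne
    | cons a t => exact ⟨a, t, rfl⟩
  unfold expansion
  simp only [PySem.List.foldl_append_singleton_eq_map, map_zero_pyRange, Int.toNat_natCast,
    List.nil_append]
  have hm2 : (PySem.List.pyRange 0 n 1).foldl (fun acc _ =>
        acc ++ [List.replicate (PySem.List.pyGetD acc 0 []).length (0 : Int)])
        ((a :: t).map (fun m => m ++ List.replicate n.toNat 0))
      = pvM2 (a :: t) n := by
    rw [show PySem.List.pyRange 0 n 1 = PySem.List.pyRange 0 ((n.toNat : Nat) : Int) 1 by
        by_cases h : 0 ≤ n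
        · congr 1; omega
        · rw [PySem.List.pyRange_one_eq_nil (by omega),
            PySem.List.pyRange_one_eq_nil (by simp; omega)]]
    rw [PySem.List.pyRange_zero_natCast, List.foldl_map]
    rw [padrows_fold n.toNat _ (pvW (a :: t) n)
      (by simp [PySem.List.pyGetD_zero_cons, pvW, pvC, pvK_eq]) (by simp)]
    unfold pvM2
    rw [pvK_eq]
  rw [hm2]
  have hlen : (((pvM2 (a :: t) n).length : Nat) : Int) = ((pvH (a :: t) n : Nat) : Int) := by
    unfold pvM2 pvH
    push_cast
    simp
    omega
  rw [hlen, PySem.List.pyRange_zero_natCast, List.foldl_map]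
  rfl

theorem alt_eq_fold (matrix : List (List Int)) (n : Int) :
    expansion_alt matrix n = (pvBState matrix n (pvH matrix n)).1 := by
  rfl

-- facts about the rows of the padded matrix
theorem pvM2_length (matrix : List (List Int)) (n : Int) :
    (pvM2 matrix n).length = pvH matrix n := by simp [pvM2, pvH]

theorem pvM2_get_lt (matrix : List (List Int)) (n : Int) (x : Nat) (hx : x < matrix.length) :
    (pvM2 matrix n)[x]'(by rw [pvM2_length]; simp [pvH]; omega)
      = matrix[x] ++ List.replicate (pvK n) 0 := by
  unfold pvM2
  rw [List.getElem_append_left (by simpa using hx)]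
  simp

theorem pvM2_get_ge (matrix : List (List Int)) (n : Int) (x : Nat)
    (hx1 : matrix.length ≤ x) (hx2 : x < pvH matrix n) :
    (pvM2 matrix n)[x]'(by rw [pvM2_length]; omega)
      = List.replicate (pvW matrix n) 0 := by
  unfold pvM2
  rw [List.getElem_append_right (by simpa using hx1)]
  simp

theorem pvCols_length (W : Nat) (out : List (List Int)) : (pvCols W out).length = W := by
  simp [pvCols]

-- small helpers for the induction step
theorem take_succ_set (arr : List Int) (x : Nat) (v : Int) (h : x < arr.length) :
    (arr.set x v).take (x + 1) = arr.take x ++ [v] := by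
  rw [List.set_eq_take_append_cons_drop, if_pos h, List.take_append]
  have hlt : (arr.take x).length = x := by simp; omega
  congr 1
  · rw [List.take_of_length_le (by omega)]
  · rw [hlt, show x + 1 - x = 1 by omega]
    simp

theorem zeroBase_iff (r : List Int) : zeroBase r = true ↔ ∀ v ∈ r, v = 0 := by
  simp [zeroBase, List.all_eq_true]

theorem zeroBase_pad (r : List Int) (k : Nat) :
    zeroBase (r ++ List.replicate k (0 : Int)) = true ↔ ∀ v ∈ r, v = 0 := by
  rw [zeroBase_iff]
  constructor
  · intro h v hv
    exact h v (List.mem_append_left _ hv)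
  · intro h v hv
    rcases List.mem_append.1 hv with hv | hv
    · exact h v hv
    · exact List.eq_of_mem_replicate hv

theorem any_ne_iff (r : List Int) :
    (r.any (fun v => !(v == 0)) = true) ↔ ¬ ∀ v ∈ r, v = 0 := by
  constructor
  · intro h hall
    obtain ⟨v, hv, hne⟩ := List.any_eq_true.1 h
    have hvne : v ≠ 0 := by simpa using hne
    exact hvne (hall v hv)
  · intro h
    rw [List.any_eq_true]
    by_contra hno
    apply h
    intro v hv
    by_contra hne
    exact hno ⟨v, hv, by simpa using hne⟩

theorem pvBState_succ (matrix : List (List Int)) (n : Int) (x : Nat) :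
    pvBState matrix n (x + 1) = pvBStep matrix n (pvBState matrix n x) x := by
  unfold pvBState
  rw [List.range_succ, List.foldl_append]
  rfl

theorem pvAfold_succ (n : Int) (m2 : List (List Int)) (x : Nat) :
    (List.range (x + 1)).foldl (pvAStep n) m2
      = pvAStep n ((List.range x).foldl (pvAStep n) m2) x := by
  rw [List.range_succ, List.foldl_append]
  rfl

-- the non-zero-row branch of A computed in closed form
theorem expAFill_eq (mat : List (List Int)) (x : Nat) (n : Int) (hx : x < mat.length)
    (hn : 0 < n) (hlen : n ≤ ((mat.getD x []).length : Int)) :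
    expAFill (x : Int) n mat
      = mat.set x (fillIter n.toNat (mat.getD x []) ((mat.getD x []).length - n.toNat)) := by
  unfold expAFill
  rw [show (PySem.List.pyRange 0 n 1) = (PySem.List.pyRange 0 ((n.toNat : Nat) : Int) 1) by
      congr 1; omega,
    PySem.List.pyRange_zero_natCast, List.foldl_map]
  exact fillA_aux n.toNat mat x n hx (by omega) hlen

-- indexing/set at a known split point
theorem getD_append_at {α : Type} (l1 l2 : List α) (a d : α) (nn : Nat) (h : l1.length = nn) :
    (l1 ++ a :: l2).getD nn d = a := by
  subst h
  exact getD_append_cons l1 l2 a d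

theorem set_append_at {α : Type} (l1 l2 : List α) (a b : α) (nn : Nat) (h : l1.length = nn) :
    (l1 ++ a :: l2).set nn b = l1 ++ b :: l2 := by
  subst h
  exact set_append_cons l1 l2 a b

-- the zero-row branch of A computed in closed form
theorem expAZero_eq (out rest : List (List Int)) (x W : Nat) (hout : out.length = x)
    (hlenrow : (PySem.List.pyGetD (out ++ rest) ((x : Nat) : Int) []).length = W)
    (hxW : x < W) :
    expAZero ((x : Nat) : Int) (out ++ rest)
      = ((pvCols W out).take x ++ [pvDiag out x]) ++
          dbl ((pvCols W out).take x ++ [pvDiag out x]).sum (W - (x + 1)) := by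
  subst hout
  have hgetj : ∀ j : Nat, j < out.length →
      PySem.List.pyGetD (out ++ rest) ((j : Nat) : Int) [] = out.getD j [] := by
    intro j hj
    rw [PySem.List.pyGetD_natCast, List.getD_append _ _ _ _ hj]
  unfold expAZero
  simp only [hlenrow]
  have harr0 : (PySem.List.pyRange 0 ((W : Nat) : Int) 1).foldl (fun arr c =>
      arr ++ [(PySem.List.pyRange 0 ((out.length : Nat) : Int) 1).foldl
        (fun s j => s + PySem.List.pyGetD (PySem.List.pyGetD (out ++ rest) j []) c 0) 0]) []
      = pvCols W out := by
    rw [PySem.List.foldl_append_singleton_eq_map, List.nil_append]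
    simp only [PySem.List.pyRange_zero_natCast, List.map_map, List.foldl_map]
    unfold pvCols
    apply List.map_congr_left
    intro c _
    simp only [Function.comp]
    rw [PySem.List.foldl_add, zero_add]
    calc ((List.range out.length).map (fun (j : Nat) =>
            PySem.List.pyGetD (PySem.List.pyGetD (out ++ rest) ((j : Nat) : Int) [])
              ((c : Nat) : Int) 0)).sum
        = ((List.range out.length).map (fun j => ((out.getD j []).getD c 0))).sum := by
          congr 1
          apply List.map_congr_left
          intro j hj
          rw [hgetj j (List.mem_range.1 hj), PySem.List.pyGetD_natCast]
      _ = (out.map (fun r => r.getD c 0)).sum := by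
          rw [getD_range_map ([] : List Int) (fun r => r.getD c 0) out]
  rw [harr0, diag_fold]
  dsimp only
  have hdiagv : ((List.range out.length).map (fun (j : Nat) =>
        PySem.List.pyGetD (PySem.List.pyGetD (out ++ rest) ((j : Nat) : Int) [])
          ((j : Nat) : Int) 0)).sum
      = pvDiag out out.length := by
    unfold pvDiag
    congr 1
    apply List.map_congr_left
    intro j hj
    rw [hgetj j (List.mem_range.1 hj), PySem.List.pyGetD_natCast]
  rw [hdiagv, PySem.List.pySetD_natCast]
  have hlen0 : (pvCols W out).length = W := pvCols_length W out
  have hlen1 : ((pvCols W out).set out.length (pvDiag out out.length)).length = W := by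
    simp [hlen0]
  have hrange : PySem.List.pyRange (((out.length : Nat) : Int) + 1) ((W : Nat) : Int) 1
      = (List.range (W - (out.length + 1))).map
          (fun k => (((out.length + 1 + k : Nat) : Nat) : Int)) := by
    rw [show ((out.length : Nat) : Int) + 1 = (((out.length + 1 : Nat) : Nat) : Int) by
      push_cast; ring]
    rw [PySem.List.pyRange_one]
    rw [show (((W : Nat) : Int) - ((out.length + 1 : Nat) : Int)).toNat
        = W - (out.length + 1) by omega]
    apply List.map_congr_left
    intro k _
    push_cast
    ring
  rw [hrange, List.foldl_map]
  rw [fillC_aux (W - (out.length + 1))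
    ((pvCols W out).set out.length (pvDiag out out.length)) (out.length + 1)]
  rw [fillIter_eq _ _ _ (by rw [hlen1]; omega)]
  rw [take_succ_set _ _ _ (by rw [hlen0]; omega)]
  rw [List.drop_of_length_le (by rw [hlen1]; omega), List.append_nil]

-- the invariant is preserved once the step's row is identified
theorem pvInv_common (matrix : List (List Int)) (n : Int) (x : Nat)
    (ih : pvInv matrix n x) (row : List Int) (hrowlen : row.length = pvW matrix n)
    (hbrow : pvBrow matrix n (pvBState matrix n x) x = row)
    (hAstep : pvAStep n ((pvBState matrix n x).1 ++ (pvM2 matrix n).drop x) x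
        = (pvBState matrix n x).1 ++ row :: (pvM2 matrix n).drop (x + 1)) :
    pvInv matrix n (x + 1) := by
  obtain ⟨hA, hlen, hrows, hcols, hdiag⟩ := ih
  have hstep := pvBState_succ matrix n x
  have h1 : (pvBState matrix n (x + 1)).1 = (pvBState matrix n x).1 ++ [row] := by
    rw [hstep]
    unfold pvBStep
    rw [hbrow]
  refine ⟨?_, ?_, ?_, ?_, ?_⟩
  · rw [pvAfold_succ, hA, hAstep, h1, List.append_assoc, List.cons_append, List.nil_append]
  · rw [h1]
    simp [hlen]
  · rw [h1]
    intro r hr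
    rcases List.mem_append.1 hr with hr | hr
    · exact hrows r hr
    · rw [List.mem_singleton.1 hr]
      exact hrowlen
  · rw [hstep]
    unfold pvBStep
    rw [hbrow]
    show ((pvBState matrix n x).2.1.zip row).map (fun p => p.1 + p.2)
        = pvCols (pvW matrix n) ((pvBState matrix n x).1 ++ [row])
    rw [hcols]
    unfold pvCols
    rw [zip_map_range (pvW matrix n) _ row (by rw [hrowlen])]
    rw [List.map_map]
    apply List.map_congr_left
    intro c _
    simp only [Function.comp]
    rw [List.map_append, List.sum_append]
    simp
  · rw [hstep]
    unfold pvBStep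
    rw [hbrow]
    show (pvBState matrix n x).2.2 + (if x < pvW matrix n then row.getD x 0 else 0)
        = pvDiag ((pvBState matrix n x).1 ++ [row]) (min (x + 1) (pvW matrix n))
    rw [hdiag]
    by_cases hxW : x < pvW matrix n
    · rw [if_pos hxW]
      rw [show min x (pvW matrix n) = x by omega, show min (x + 1) (pvW matrix n) = x + 1 by omega]
      unfold pvDiag
      rw [List.range_succ, List.map_append, List.sum_append]
      congr 1
      · congr 1
        apply List.map_congr_left
        intro j hj
        rw [List.getD_append _ _ _ _ (by rw [hlen]; exact List.mem_range.1 hj)]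
      · simp only [List.map_cons, List.map_nil, List.sum_cons, List.sum_nil, add_zero]
        rw [getD_append_at _ _ _ _ x hlen]
    · rw [if_neg hxW]
      rw [show min x (pvW matrix n) = pvW matrix n by omega,
        show min (x + 1) (pvW matrix n) = pvW matrix n by omega]
      unfold pvDiag
      rw [add_zero]
      congr 1
      apply List.map_congr_left
      intro j hj
      rw [List.getD_append _ _ _ _ (by rw [hlen]; have := List.mem_range.1 hj; omega)]

-- the induction step of the main invariant
theorem pvInv_step (matrix : List (List Int)) (n : Int)
    (rect : ∀ r ∈ matrix, r.length = pvC matrix)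
    (hn1 : 1 ≤ n → matrix ≠ [] ∧ matrix.length ≤ pvC matrix)
    (hz : ∀ i < matrix.length, (∀ v ∈ matrix.getD i [], v = 0) → i < pvW matrix n)
    (x : Nat) (hx : x < pvH matrix n) (ih : pvInv matrix n x) : pvInv matrix n (x + 1) := by
  obtain ⟨hA, hlen, hrows, hcols, hdiag⟩ := ih
  have hxm2 : x < (pvM2 matrix n).length := by rw [pvM2_length]; omega
  have hdropx : (pvM2 matrix n).drop x = (pvM2 matrix n)[x] :: (pvM2 matrix n).drop (x + 1) :=
    List.drop_eq_getElem_cons hxm2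
  have hget : PySem.List.pyGetD ((pvBState matrix n x).1 ++ (pvM2 matrix n).drop x)
      ((x : Nat) : Int) [] = (pvM2 matrix n)[x] := by
    rw [hdropx, PySem.List.pyGetD_natCast, getD_append_at _ _ _ _ x hlen]
  have hKn : 0 < n → pvK n = n.toNat := by intro h; unfold pvK; split <;> omega
  have hK0 : ¬ 0 < n → pvK n = 0 := by intro h; unfold pvK; split <;> omega
  by_cases hxR : x < matrix.length
  · have hm2x : (pvM2 matrix n)[x] = matrix[x] ++ List.replicate (pvK n) 0 :=
      pvM2_get_lt matrix n x hxR
    have hCx : matrix[x].length = pvC matrix := rect _ (List.getElem_mem hxR)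
    have hrowlen : ((pvM2 matrix n)[x]).length = pvW matrix n := by
      rw [hm2x]
      simp [pvW, hCx]
    by_cases hall : ∀ v ∈ matrix.getD x [], v = 0
    · -- an original all-zero row: A recomputes column sums, B uses its running sums
      have hallE : ∀ v ∈ matrix[x], v = 0 := by
        intro v hv
        exact hall v (by rw [List.getD_eq_getElem _ _ hxR]; exact hv)
      have hxW : x < pvW matrix n := hz x hxR hall
      have hzb : zeroBase ((pvM2 matrix n)[x]) = true := by
        rw [hm2x]
        exact (zeroBase_pad _ _).2 hallE
      have hbcond : ¬ (x < matrix.length ∧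
          ((matrix.getD x []).any (fun v => !(v == 0))) = true) := by
        rintro ⟨-, hany⟩
        exact (any_ne_iff _).1 hany hall
      have hr0len : ((pvCols (pvW matrix n) (pvBState matrix n x).1).take x ++
          [pvDiag (pvBState matrix n x).1 x]).length = x + 1 := by
        rw [List.length_append, List.length_take, pvCols_length, List.length_cons,
          List.length_nil]
        omega
      apply pvInv_common matrix n x ⟨hA, hlen, hrows, hcols, hdiag⟩
        (((pvCols (pvW matrix n) (pvBState matrix n x).1).take x ++
            [pvDiag (pvBState matrix n x).1 x]) ++
          dbl ((pvCols (pvW matrix n) (pvBState matrix n x).1).take x ++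
            [pvDiag (pvBState matrix n x).1 x]).sum (pvW matrix n - (x + 1)))
      · rw [List.length_append, dbl_length, hr0len]
        omega
      · unfold pvBrow
        rw [if_neg hbcond]
        rw [hcols, hdiag, show min x (pvW matrix n) = x by omega]
        rw [growB_eq (pvW matrix n) (pvW matrix n - (x + 1)) _ _ (by rw [hr0len]; omega)]
      · unfold pvAStep
        rw [hget, if_neg (by rw [hzb]; simp), hdropx]
        have hget2 : (PySem.List.pyGetD ((pvBState matrix n x).1 ++
            (pvM2 matrix n)[x] :: (pvM2 matrix n).drop (x + 1)) ((x : Nat) : Int) []).length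
            = pvW matrix n := by
          rw [PySem.List.pyGetD_natCast, getD_append_at _ _ _ _ x hlen, hrowlen]
        rw [expAZero_eq (pvBState matrix n x).1
          ((pvM2 matrix n)[x] :: (pvM2 matrix n).drop (x + 1)) x (pvW matrix n) hlen hget2
          (by omega)]
        rw [PySem.List.pySetD_natCast, set_append_at _ _ _ _ x hlen]
    · -- a non-zero row: A re-sums prefixes in place, B appends a doubling total
      have hany : ((matrix.getD x []).any (fun v => !(v == 0))) = true :=
        (any_ne_iff _).2 hall
      have hzb : ¬ zeroBase ((pvM2 matrix n)[x]) = true := by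
        rw [hm2x]
        intro hc
        exact hall (by
          intro v hv
          exact (zeroBase_pad _ _).1 hc v (by rwa [List.getD_eq_getElem _ _ hxR] at hv))
      apply pvInv_common matrix n x ⟨hA, hlen, hrows, hcols, hdiag⟩
        (matrix.getD x [] ++ dbl (matrix.getD x []).sum (pvK n))
      · rw [List.length_append, dbl_length, List.getD_eq_getElem _ _ hxR, hCx]
        rfl
      · unfold pvBrow
        rw [if_pos ⟨hxR, hany⟩]
        exact range_foldl_dbl (pvK n) _ _
      · unfold pvAStep
        rw [hget, if_pos hzb, hdropx]
        have hget2 : ((pvBState matrix n x).1 ++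
            (pvM2 matrix n)[x] :: (pvM2 matrix n).drop (x + 1)).getD x []
            = (pvM2 matrix n)[x] := getD_append_at _ _ _ _ x hlen
        by_cases hn : 0 < n
        · rw [expAFill_eq _ x n (by
              rw [List.length_append, List.length_cons]
              omega) hn (by
              rw [hget2, hrowlen]
              have := hKn hn
              unfold pvW
              omega)]
          rw [hget2, hrowlen]
          rw [show pvW matrix n - n.toNat = pvC matrix by
            have := hKn hn; unfold pvW at *; omega]
          rw [fillIter_eq _ _ _ (by
            rw [hrowlen]
            have := hKn hn
            unfold pvW
            omega)]
          rw [hm2x]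
          rw [List.take_left' hCx]
          rw [show List.drop (pvC matrix + n.toNat)
              (matrix[x] ++ List.replicate (pvK n) 0) = ([] : List Int) from
            List.drop_of_length_le (by
              rw [List.length_append, List.length_replicate, hCx, hKn hn]), List.append_nil]
          rw [show n.toNat = pvK n from (hKn hn).symm]
          rw [set_append_at _ _ _ _ x hlen]
          rw [List.getD_eq_getElem _ _ hxR]
        · unfold expAFill
          rw [PySem.List.pyRange_one_eq_nil (by omega)]
          simp only [List.foldl_nil]
          rw [show (matrix.getD x [] ++ dbl (matrix.getD x []).sum (pvK n))
              = (pvM2 matrix n)[x] by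
            rw [hm2x, hK0 hn, List.getD_eq_getElem _ _ hxR]
            simp [dbl]]
  · -- an appended zero row
    have hK1 : 1 ≤ pvK n := by
      by_contra hc
      have : pvK n = 0 := by omega
      rw [pvH, this] at hx
      omega
    have hn' : 1 ≤ n := by
      by_contra hc
      have := hK0 (by omega)
      omega
    have hxW : x < pvW matrix n := by
      have := (hn1 hn').2
      rw [pvH] at hx
      rw [pvW]
      omega
    have hm2x : (pvM2 matrix n)[x] = List.replicate (pvW matrix n) 0 :=
      pvM2_get_ge matrix n x (by omega) hx
    have hzb : zeroBase ((pvM2 matrix n)[x]) = true := by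
      rw [hm2x, zeroBase_iff]
      intro v hv
      exact List.eq_of_mem_replicate hv
    have hbcond : ¬ (x < matrix.length ∧
        ((matrix.getD x []).any (fun v => !(v == 0))) = true) := by
      rintro ⟨hc, -⟩
      omega
    have hrowlen : ((pvM2 matrix n)[x]).length = pvW matrix n := by
      rw [hm2x, List.length_replicate]
    have hr0len : ((pvCols (pvW matrix n) (pvBState matrix n x).1).take x ++
        [pvDiag (pvBState matrix n x).1 x]).length = x + 1 := by
      rw [List.length_append, List.length_take, pvCols_length, List.length_cons,
        List.length_nil]
      omega
    apply pvInv_common matrix n x ⟨hA, hlen, hrows, hcols, hdiag⟩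
      (((pvCols (pvW matrix n) (pvBState matrix n x).1).take x ++
          [pvDiag (pvBState matrix n x).1 x]) ++
        dbl ((pvCols (pvW matrix n) (pvBState matrix n x).1).take x ++
          [pvDiag (pvBState matrix n x).1 x]).sum (pvW matrix n - (x + 1)))
    · rw [List.length_append, dbl_length, hr0len]
      omega
    · unfold pvBrow
      rw [if_neg hbcond]
      rw [hcols, hdiag, show min x (pvW matrix n) = x by omega]
      rw [growB_eq (pvW matrix n) (pvW matrix n - (x + 1)) _ _ (by rw [hr0len]; omega)]
    · unfold pvAStep
      rw [hget, if_neg (by rw [hzb]; simp), hdropx]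
      have hget2 : (PySem.List.pyGetD ((pvBState matrix n x).1 ++
          (pvM2 matrix n)[x] :: (pvM2 matrix n).drop (x + 1)) ((x : Nat) : Int) []).length
          = pvW matrix n := by
        rw [PySem.List.pyGetD_natCast, getD_append_at _ _ _ _ x hlen, hrowlen]
      rw [expAZero_eq (pvBState matrix n x).1
        ((pvM2 matrix n)[x] :: (pvM2 matrix n).drop (x + 1)) x (pvW matrix n) hlen hget2
        (by omega)]
      rw [PySem.List.pySetD_natCast, set_append_at _ _ _ _ x hlen]

theorem pvInv_zero (matrix : List (List Int)) (n : Int) : pvInv matrix n 0 := by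
  unfold pvInv pvBState
  refine ⟨by simp, by simp, by simp, ?_, by simp [pvDiag]⟩
  simp [pvCols]

theorem pvInv_all (matrix : List (List Int)) (n : Int)
    (rect : ∀ r ∈ matrix, r.length = pvC matrix)
    (hn1 : 1 ≤ n → matrix ≠ [] ∧ matrix.length ≤ pvC matrix)
    (hz : ∀ i < matrix.length, (∀ v ∈ matrix.getD i [], v = 0) → i < pvW matrix n) :
    ∀ x, x ≤ pvH matrix n → pvInv matrix n x := by
  intro x
  induction x with
  | zero => intro _; exact pvInv_zero matrix n
  | succ x ihx =>
    intro hx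
    exact pvInv_step matrix n rect hn1 hz x (by omega) (ihx (by omega))

theorem pvC_eq (matrix : List (List Int)) : pvC matrix = (matrix.headD []).length := by
  cases matrix <;> rfl

-- ===== VERDICT (by name: the statement is the Claim_ definition above) =====
theorem expansion_spec : Claim_equal_expansion := by
  unfold Claim_equal_expansion
  intro matrix n _ hpre
  unfold Spec_expansion
  obtain ⟨rect, hn1, hz⟩ := hpre
  cases hmat : matrix with
  | nil =>
    subst hmat
    have hn0 : n ≤ 0 := by
      by_contra h
      exact (hn1 (by omega)).1 rfl
    unfold expansion expansion_alt
    rw [PySem.List.pyRange_one_eq_nil (by omega)]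
    simp [show ¬ (0 : Int) < n by omega, PySem.List.pyRange_one_eq_nil]
  | cons a t =>
    subst hmat
    have rect' : ∀ r ∈ (a :: t), r.length = pvC (a :: t) := by
      intro r hr; rw [pvC_eq]; exact rect r hr
    have hn1' : 1 ≤ n → (a :: t) ≠ [] ∧ (a :: t).length = (a :: t).length ∧ True := fun _ => ⟨by simp, rfl, trivial⟩
    have hinv := pvInv_all (a :: t) n rect'
      (fun h => ⟨(hn1 h).1, by rw [pvC_eq]; exact (hn1 h).2⟩)
      (fun i hi hzi => by
        rw [pvW, pvC_eq, pvK_eq]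
        exact hz i hi hzi)
      (pvH (a :: t) n) le_rfl
    unfold pvInv at hinv
    rw [expansion_eq_fold (a :: t) n (by simp), alt_eq_fold]
    rw [hinv.1, List.drop_of_length_le (by rw [pvM2_length]), List.append_nil]
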